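-- pv_equiv track=rewrite | github.com/MrBrantCode/unitest_baseline | mut_generate/mist_train_taco/taco_4932/solution.py | find_best_subgrid
-- ===== SOURCE A (Python) =====
-- import itertools
--
-- def init_square_cache():
--     return [i ** 2 for i in range(41)]
--
-- def find_best_subgrid(purchased_land, perfect_store, R, C, H, W):
--     square_cache = init_square_cache()
--     height_sub = R - H + 1
--     width_sub = C - W + 1
--
--     min_sum = float('inf')
--     best_top_left_row = 1
--     best_top_left_col = 1
--
--     for (i, j) in itertools.product(range(height_sub), range(width_sub)):
--         current_sum = sum(
--             sum(
--                 square_cache[abs(x - y)]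
--                 for (x, y) in zip(purchased_land[i + k][j:j + W], perfect_store[k])
--             )
--             for k in range(H)
--         )
--
--         if current_sum < min_sum:
--             min_sum = current_sum
--             best_top_left_row = i + 1
--             best_top_left_col = j + 1
--
--     return min_sum, best_top_left_row, best_top_left_col
-- ===== SOURCE B (Python) =====
-- def find_best_subgrid(purchased_land, perfect_store, R, C, H, W):
--     height_sub = R - H + 1
--     width_sub = C - W + 1
--     # Stage 1: for each template row, precompute its squared-difference cost
--     # against every candidate grid row at every horizontal offset.
--     row_cost = [[[sum((purchased_land[i + k][j + t] - perfect_store[k][t]) ** 2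
--                       for t in range(W))
--                   for j in range(width_sub)]
--                  for i in range(height_sub)]
--                 for k in range(H)]
--     # Stage 2: score each placement by summing H precomputed row costs.
--     best = None
--     for i in range(height_sub):
--         for j in range(width_sub):
--             s = 0
--             for k in range(H):
--                 s += row_cost[k][i][j]
--             if best is None or s < best[0]:
--                 best = (s, i + 1, j + 1)
--     return best
-- ===== Notes on version B (the rewrite author's own statement) =====
-- stated objective: alternative
-- what changed: B precomputes a 3D table of per-template-row costs (template row k vs each candidate grid row at each horizontal offset) in a first pass and then scores each placement by summing H table entries, instead of A's single nested scan that re-slices grid rows, zips them with template rows and looks squares up in a precomputed cache; Pre_ excludes template rows shorter than W (A's zip silently truncates there), negative W with a nonempty template (A's slice wraps), empty placement ranges (A returns float inf) and other inputs where A raises.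
-- outside the precondition, e.g. on find_best_subgrid([[1, 2]], [[]], 1, 2, 1, 1): A returns (0, 1, 1), B raises IndexError; on find_best_subgrid([[1, 4], []], [[-1, 3]], 2, 0, 1, -1): A returns (0, 1, 2), B returns (0, 1, 1); on find_best_subgrid([], [[1]], 0, 1, 1, 1): A returns (inf, 1, 1), B returns None
import Mathlib
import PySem

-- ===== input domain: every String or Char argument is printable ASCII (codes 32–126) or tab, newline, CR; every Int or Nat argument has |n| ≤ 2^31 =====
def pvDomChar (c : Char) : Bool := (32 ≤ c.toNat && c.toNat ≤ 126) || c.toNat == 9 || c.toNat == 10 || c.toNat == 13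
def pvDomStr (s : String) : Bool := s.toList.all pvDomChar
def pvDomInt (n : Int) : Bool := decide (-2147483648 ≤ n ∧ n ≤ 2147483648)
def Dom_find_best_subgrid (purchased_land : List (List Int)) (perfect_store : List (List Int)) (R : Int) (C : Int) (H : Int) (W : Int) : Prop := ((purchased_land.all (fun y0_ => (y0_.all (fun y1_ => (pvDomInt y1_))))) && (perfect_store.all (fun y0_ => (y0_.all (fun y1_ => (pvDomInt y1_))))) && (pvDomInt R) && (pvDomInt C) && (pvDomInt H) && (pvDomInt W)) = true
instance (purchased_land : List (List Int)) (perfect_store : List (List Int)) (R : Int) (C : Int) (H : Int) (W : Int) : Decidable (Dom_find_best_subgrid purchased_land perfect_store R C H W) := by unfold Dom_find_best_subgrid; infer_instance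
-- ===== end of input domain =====

-- B precomputes a table of per-template-row costs and scores each placement by summing H
-- table entries, instead of A's single nested scan (objective: alternative, same cost).

-- ===== PORT A =====
-- float('inf') is modelled as `none` in the running minimum (inside Pre_ the loop is
-- nonempty, so the final `.getD 0` is never the returned value of an admitted input).
def find_best_subgrid (purchased_land : List (List Int)) (perfect_store : List (List Int)) (R : Int) (C : Int) (H : Int) (W : Int) : Int × Int × Int :=
  let square_cache : List Int := (PySem.List.pyRange 0 41).map (fun i => i ^ 2)
  let height_sub := R - H + 1
  let width_sub := C - W + 1
  let prod := (PySem.List.pyRange 0 height_sub).flatMap (fun i =>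
      (PySem.List.pyRange 0 width_sub).map (fun j => (i, j)))
  let st := prod.foldl (fun (st : Option Int × Int × Int) p =>
      let current_sum := ((PySem.List.pyRange 0 H).map (fun k =>
        ((List.zip (PySem.List.slice (PySem.List.pyGetD purchased_land (p.1 + k) []) (some p.2) (some (p.2 + W)))
                   (PySem.List.pyGetD perfect_store k [])).map
          (fun xy => PySem.List.pyGetD square_cache |xy.1 - xy.2| 0)).sum)).sum
      match st with
      | (none, _, _) => (some current_sum, p.1 + 1, p.2 + 1)
      | (some m, bi, bj) =>
          if current_sum < m then (some current_sum, p.1 + 1, p.2 + 1) else (some m, bi, bj))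
    (none, 1, 1)
  (st.1.getD 0, st.2.1, st.2.2)

-- ===== PORT B =====
-- Python B's list indexing raises on out-of-range indices; inside Pre_ every index used is
-- in range, so the pyGetD defaults are never the value of an admitted input. B returns None
-- when the placement range is empty; that is outside Pre_, modelled by the final `.getD`.
def find_best_subgrid_alt (purchased_land : List (List Int)) (perfect_store : List (List Int)) (R : Int) (C : Int) (H : Int) (W : Int) : Int × Int × Int :=
  let height_sub := R - H + 1
  let width_sub := C - W + 1
  let row_cost : List (List (List Int)) := (PySem.List.pyRange 0 H).map (fun k =>
    (PySem.List.pyRange 0 height_sub).map (fun i =>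
      (PySem.List.pyRange 0 width_sub).map (fun j =>
        ((PySem.List.pyRange 0 W).map (fun t =>
          (PySem.List.pyGetD (PySem.List.pyGetD purchased_land (i + k) []) (j + t) 0 -
           PySem.List.pyGetD (PySem.List.pyGetD perfect_store k []) t 0) ^ 2)).sum)))
  let best := ((PySem.List.pyRange 0 height_sub).flatMap (fun i =>
      (PySem.List.pyRange 0 width_sub).map (fun j => (i, j)))).foldl
    (fun (b : Option (Int × Int × Int)) p =>
      let s := (PySem.List.pyRange 0 H).foldl (fun s k =>
        s + PySem.List.pyGetD (PySem.List.pyGetD (PySem.List.pyGetD row_cost k []) p.1 []) p.2 0) 0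
      match b with
      | none => some (s, p.1 + 1, p.2 + 1)
      | some m => if s < m.1 then some (s, p.1 + 1, p.2 + 1) else some m)
    none
  best.getD (0, 1, 1)

-- ===== PRECONDITION & SPEC =====
-- Pre_ excludes: negative W when the template has rows (A's slice j:j+W wraps to the row's
-- end, a Python-slicing artefact); empty search ranges H > R or W > C (A returns float inf,
-- not an int triple); grids smaller than R×C or templates with fewer than H rows (A raises
-- IndexError); template rows shorter than W (A's zip silently truncates, an accident of
-- zip — B indexes them and raises); and aligned grid/template values differing by more
-- than 40 (A's square_cache[abs(x-y)] raises IndexError).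
def Pre_find_best_subgrid (purchased_land : List (List Int)) (perfect_store : List (List Int)) (R : Int) (C : Int) (H : Int) (W : Int) : Prop :=
  (0 ≤ W ∨ H ≤ 0) ∧ H ≤ R ∧ W ≤ C ∧
  (0 < H → (R ≤ (purchased_land.length : Int) ∧ H ≤ (perfect_store.length : Int))) ∧
  (0 < H ∧ 0 < W → ∀ row ∈ purchased_land.take R.toNat, C ≤ (row.length : Int)) ∧
  (0 < H ∧ 0 < W → ∀ trow ∈ perfect_store.take H.toNat, W ≤ (trow.length : Int)) ∧
  (∀ k < perfect_store.length, (k : Int) < H →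
    ∀ t < (perfect_store.getD k []).length, (t : Int) < W →
      ∀ r < purchased_land.length, k ≤ r → (r : Int) < (k : Int) + (R - H + 1) →
        ∀ c < (purchased_land.getD r []).length, t ≤ c → (c : Int) < (t : Int) + (C - W + 1) →
          |((purchased_land.getD r []).getD c 0) - ((perfect_store.getD k []).getD t 0)| ≤ 40)

instance (purchased_land : List (List Int)) (perfect_store : List (List Int)) (R : Int) (C : Int) (H : Int) (W : Int) : Decidable (Pre_find_best_subgrid purchased_land perfect_store R C H W) := by
  unfold Pre_find_best_subgrid
  haveI Dc : ∀ (k t r : ℕ), Decidable (∀ c < (purchased_land.getD r []).length, t ≤ c → (c : Int) < (t : Int) + (C - W + 1) →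
      |((purchased_land.getD r []).getD c 0) - ((perfect_store.getD k []).getD t 0)| ≤ 40) := fun k t r => inferInstance
  haveI Dr : ∀ (k t : ℕ), Decidable (∀ r < purchased_land.length, k ≤ r → (r : Int) < (k : Int) + (R - H + 1) →
      ∀ c < (purchased_land.getD r []).length, t ≤ c → (c : Int) < (t : Int) + (C - W + 1) →
        |((purchased_land.getD r []).getD c 0) - ((perfect_store.getD k []).getD t 0)| ≤ 40) := fun k t => inferInstance
  infer_instance

def pvWitness_find_best_subgrid : List (List Int) × List (List Int) × Int × Int × Int × Int :=
  ([[3, 1], [2, 4]], [[1]], 2, 2, 1, 1)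

def Spec_find_best_subgrid (purchased_land : List (List Int)) (perfect_store : List (List Int)) (R : Int) (C : Int) (H : Int) (W : Int) (out : Int × Int × Int) : Prop := out = find_best_subgrid_alt purchased_land perfect_store R C H W
instance (purchased_land : List (List Int)) (perfect_store : List (List Int)) (R : Int) (C : Int) (H : Int) (W : Int) (out : Int × Int × Int) : Decidable (Spec_find_best_subgrid purchased_land perfect_store R C H W out) := by unfold Spec_find_best_subgrid; infer_instance

-- ===== CLAIM (what is proved, stated in full; the proofs are below) =====
def Claim_equal_find_best_subgrid : Prop := ∀ (purchased_land : List (List Int)) (perfect_store : List (List Int)) (R : Int) (C : Int) (H : Int) (W : Int), Dom_find_best_subgrid purchased_land perfect_store R C H W → Pre_find_best_subgrid purchased_land perfect_store R C H W → Spec_find_best_subgrid purchased_land perfect_store R C H W (find_best_subgrid purchased_land perfect_store R C H W)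

-- ===== LEMMAS AND PROOFS =====

-- A's per-position cost, as it appears in the port of A.
def pvCostA (purchased_land perfect_store : List (List Int)) (W H : Int) (p : Int × Int) : Int :=
  ((PySem.List.pyRange 0 H).map (fun k =>
    ((List.zip (PySem.List.slice (PySem.List.pyGetD purchased_land (p.1 + k) []) (some p.2) (some (p.2 + W)))
               (PySem.List.pyGetD perfect_store k [])).map
      (fun xy => PySem.List.pyGetD ((PySem.List.pyRange 0 41).map (fun i => i ^ 2)) |xy.1 - xy.2| 0)).sum)).sum

-- B's per-position cost: what one entry of the row_cost table contributes, summed over k.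
def pvCostB (purchased_land perfect_store : List (List Int)) (W H : Int) (p : Int × Int) : Int :=
  ((PySem.List.pyRange 0 H).map (fun k =>
    ((PySem.List.pyRange 0 W).map (fun t =>
      (PySem.List.pyGetD (PySem.List.pyGetD purchased_land (p.1 + k) []) (p.2 + t) 0 -
       PySem.List.pyGetD (PySem.List.pyGetD perfect_store k []) t 0) ^ 2)).sum)).sum

-- A's loop step, abstracted over the cost function.
def pvStepA (f : Int × Int → Int) (st : Option Int × Int × Int) (p : Int × Int) : Option Int × Int × Int :=
  match st with
  | (none, _, _) => (some (f p), p.1 + 1, p.2 + 1)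
  | (some m, bi, bj) => if f p < m then (some (f p), p.1 + 1, p.2 + 1) else (some m, bi, bj)

-- the shared running-minimum step on already-scored candidates
def pvStepM (acc : Option (Int × Int × Int)) (x : Int × Int × Int) : Option (Int × Int × Int) :=
  match acc with
  | none => some x
  | some m => if x.1 < m.1 then some x else some m

def pvPack (o : Option (Int × Int × Int)) : Option Int × Int × Int :=
  match o with
  | none => (none, 1, 1)
  | some d => (some d.1, d.2.1, d.2.2)

theorem pv_foldA_some (f : Int × Int → Int) (l : List (Int × Int)) (c : Int × Int × Int) :
    l.foldl (pvStepA f) (some c.1, c.2.1, c.2.2) =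
      pvPack ((l.map (fun p => (f p, p.1 + 1, p.2 + 1))).foldl pvStepM (some c)) := by
  induction l generalizing c with
  | nil => rfl
  | cons p t ih =>
      simp only [List.foldl_cons, List.map_cons]
      by_cases h : f p < c.1
      · have : pvStepA f (some c.1, c.2.1, c.2.2) p = (some (f p), p.1 + 1, p.2 + 1) := by
          simp [pvStepA, h]
        rw [this]
        have : pvStepM (some c) (f p, p.1 + 1, p.2 + 1) = some (f p, p.1 + 1, p.2 + 1) := by
          simp [pvStepM, h]
        rw [this]
        exact ih (f p, p.1 + 1, p.2 + 1)
      · have : pvStepA f (some c.1, c.2.1, c.2.2) p = (some c.1, c.2.1, c.2.2) := by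
          simp [pvStepA, h]
        rw [this]
        have : pvStepM (some c) (f p, p.1 + 1, p.2 + 1) = some c := by
          simp [pvStepM, h]
        rw [this]
        exact ih c

theorem pv_foldA (f : Int × Int → Int) (l : List (Int × Int)) :
    l.foldl (pvStepA f) (none, 1, 1) =
      pvPack ((l.map (fun p => (f p, p.1 + 1, p.2 + 1))).foldl pvStepM none) := by
  cases l with
  | nil => rfl
  | cons p t =>
      simp only [List.foldl_cons, List.map_cons]
      have h1 : pvStepA f (none, 1, 1) p = (some (f p), p.1 + 1, p.2 + 1) := rfl
      have h2 : pvStepM none (f p, p.1 + 1, p.2 + 1) = some (f p, p.1 + 1, p.2 + 1) := rfl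
      rw [h1, h2]
      exact pv_foldA_some f t (f p, p.1 + 1, p.2 + 1)

-- cost equality, per template row
theorem pv_row_eq (purchased_land perfect_store : List (List Int)) (R C H W : Int)
    (hpre : Pre_find_best_subgrid purchased_land perfect_store R C H W)
    (i j k : Int) (hi0 : 0 ≤ i) (hi : i < R - H + 1) (hj0 : 0 ≤ j) (hj : j < C - W + 1)
    (hk0 : 0 ≤ k) (hk : k < H) :
    ((List.zip (PySem.List.slice (PySem.List.pyGetD purchased_land (i + k) []) (some j) (some (j + W)))
               (PySem.List.pyGetD perfect_store k [])).map
      (fun xy => PySem.List.pyGetD ((PySem.List.pyRange 0 41).map (fun i => i ^ 2)) |xy.1 - xy.2| 0)).sum =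
    ((PySem.List.pyRange 0 W).map (fun t =>
      (PySem.List.pyGetD (PySem.List.pyGetD purchased_land (i + k) []) (j + t) 0 -
        PySem.List.pyGetD (PySem.List.pyGetD perfect_store k []) t 0) ^ 2)).sum := by
  obtain ⟨hW0', hHR, hWC, hlen, hrowlen, htrowlen, hbound⟩ := hpre
  have hH0 : 0 < H := lt_of_le_of_lt hk0 hk
  have hW0 : 0 ≤ W := by
    rcases hW0' with h | h
    · exact h
    · omega
  obtain ⟨hplR, hpsH⟩ := hlen hH0
  have hikR : i + k < R := by omega
  have hikLen : (i + k).toNat < purchased_land.length := by omega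
  have hrow : PySem.List.pyGetD purchased_land (i + k) [] = purchased_land[(i + k).toNat] :=
    PySem.List.pyGetD_eq_getElem _ _ (by omega) (by omega)
  have hkLen : k.toNat < perfect_store.length := by omega
  have htk : PySem.List.pyGetD perfect_store k [] = perfect_store[k.toNat] :=
    PySem.List.pyGetD_eq_getElem _ _ hk0 (by omega)
  rcases eq_or_lt_of_le hW0 with hW | hWpos
  · -- W = 0 : both sides are empty sums
    rw [hrow, htk, ← hW]
    have h1 : PySem.List.slice purchased_land[(i + k).toNat] (some j) (some (j + 0)) = [] := by
      rw [PySem.List.slice_toNat _ hj0 (by omega)]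
      simp
    rw [h1]
    simp [PySem.List.pyRange_zero]
  · -- 0 < W
    set row : List Int := purchased_land[(i + k).toNat] with hrowdef
    set tk : List Int := perfect_store[k.toNat] with htkdef
    have hC : C ≤ (row.length : Int) := by
      apply hrowlen ⟨hH0, hWpos⟩
      have hlt : (i + k).toNat < R.toNat := by omega
      have : (purchased_land.take R.toNat)[(i + k).toNat]'(by
        rw [List.length_take]; omega) = purchased_land[(i + k).toNat] := by
        rw [List.getElem_take]
      rw [hrowdef, ← this]
      exact List.getElem_mem _
    have hWtk : W ≤ (tk.length : Int) := by
      apply htrowlen ⟨hH0, hWpos⟩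
      have hlt : k.toNat < H.toNat := by omega
      have : (perfect_store.take H.toNat)[k.toNat]'(by
        rw [List.length_take]; omega) = perfect_store[k.toNat] := by
        rw [List.getElem_take]
      rw [htkdef, ← this]
      exact List.getElem_mem _
    rw [hrow, htk]
    have hslice : PySem.List.slice row (some j) (some (j + W)) =
        (row.drop j.toNat).take W.toNat := by
      rw [PySem.List.slice_toNat _ hj0 (by omega)]
      congr 1
      omega
    rw [hslice]
    have hjW : j + W ≤ (row.length : Int) := by omega
    have hlen1 : ((row.drop j.toNat).take W.toNat).length = W.toNat := by
      rw [List.length_take, List.length_drop]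
      omega
    have hziplen : (((row.drop j.toNat).take W.toNat).zip tk).length = W.toNat := by
      rw [List.length_zip, hlen1]
      omega
    have hrangelen : (PySem.List.pyRange 0 W).length = W.toNat := by
      rw [PySem.List.length_pyRange_one]
      omega
    congr 1
    apply List.ext_getElem
    · simp [hziplen, hrangelen]
    · intro n h1 h2
      simp only [List.getElem_map]
      have hnW : n < W.toNat := by
        have := h1
        rw [List.length_map, hziplen] at this
        exact this
      have hntk : n < tk.length := by omega
      have hzel : (((row.drop j.toNat).take W.toNat).zip tk)[n]'(by rw [hziplen]; exact hnW) =
          (row[j.toNat + n]'(by omega), tk[n]'hntk) := by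
        rw [List.getElem_zip]
        congr 1
        rw [List.getElem_take, List.getElem_drop]
      have hrel : (PySem.List.pyRange 0 W)[n]'(by rw [hrangelen]; exact hnW) = (n : Int) := by
        rw [PySem.List.getElem_pyRange_one]
        omega
      rw [hzel, hrel]
      have hjn : j + (n : Int) < C := by omega
      have hx : PySem.List.pyGetD row (j + (n : Int)) 0 = row[j.toNat + n]'(by omega) := by
        rw [PySem.List.pyGetD_eq_getElem _ _ (by omega) (by omega)]
        congr 1
        omega
      have hy : PySem.List.pyGetD tk (n : Int) 0 = tk[n]'hntk := by
        rw [PySem.List.pyGetD_eq_getElem _ _ (by omega) (by omega)]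
        simp
      rw [hx, hy]
      have hps : perfect_store.getD k.toNat [] = tk := by
        rw [List.getD_eq_getElem _ _ hkLen, htkdef]
      have hplg : purchased_land.getD (i + k).toNat [] = row := by
        rw [List.getD_eq_getElem _ _ hikLen, hrowdef]
      have hb := hbound k.toNat hkLen (by omega) n (by rw [hps]; omega) (by omega)
        (i + k).toNat hikLen (by omega) (by omega)
        (j.toNat + n) (by rw [hplg]; omega) (by omega) (by omega)
      rw [hps, hplg] at hb
      have hg1 : row.getD (j.toNat + n) 0 = row[j.toNat + n]'(by omega) :=
        List.getD_eq_getElem _ _ (by omega)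
      have hg2 : tk.getD n 0 = tk[n]'hntk := List.getD_eq_getElem _ _ hntk
      rw [hg1, hg2] at hb
      set d : Int := row[j.toNat + n]'(by omega) - tk[n]'hntk with hd
      have habs : |d| < 41 := by omega
      have hcache : PySem.List.pyGetD ((PySem.List.pyRange 0 41).map (fun i => i ^ 2)) |d| 0 =
          |d| ^ 2 :=
        PySem.List.pyGetD_map_pyRange_of_nonneg _ 41 |d| 0 (abs_nonneg d) habs
      rw [hcache, sq_abs]

-- cost equality per position
theorem pv_cost_eq (purchased_land perfect_store : List (List Int)) (R C H W : Int)
    (hpre : Pre_find_best_subgrid purchased_land perfect_store R C H W)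
    (i j : Int) (hi0 : 0 ≤ i) (hi : i < R - H + 1) (hj0 : 0 ≤ j) (hj : j < C - W + 1) :
    pvCostA purchased_land perfect_store W H (i, j) =
    pvCostB purchased_land perfect_store W H (i, j) := by
  unfold pvCostA pvCostB
  congr 1
  apply List.map_congr_left
  intro k hkmem
  rw [PySem.List.mem_pyRange_one] at hkmem
  exact pv_row_eq purchased_land perfect_store R C H W hpre i j k hi0 hi hj0 hj hkmem.1 hkmem.2

theorem pv_foldM_some (xs : List (Int × Int × Int)) (c : Int × Int × Int) :
    ∃ d, xs.foldl pvStepM (some c) = some d := by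
  induction xs generalizing c with
  | nil => exact ⟨c, rfl⟩
  | cons x t ih =>
      simp only [List.foldl_cons]
      by_cases h : x.1 < c.1
      · have : pvStepM (some c) x = some x := by simp [pvStepM, h]
        rw [this]; exact ih x
      · have : pvStepM (some c) x = some c := by simp [pvStepM, h]
        rw [this]; exact ih c

theorem pv_main (purchased_land perfect_store : List (List Int)) (R C H W : Int)
    (hpre : Pre_find_best_subgrid purchased_land perfect_store R C H W) :
    find_best_subgrid purchased_land perfect_store R C H W =
      find_best_subgrid_alt purchased_land perfect_store R C H W := by
  have hpre' := hpre
  obtain ⟨hW0, hHR, hWC, _, _, _, _⟩ := hpre'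
  set prodL : List (Int × Int) := (PySem.List.pyRange 0 (R - H + 1)).flatMap (fun i =>
      (PySem.List.pyRange 0 (C - W + 1)).map (fun j => (i, j))) with hprodL
  -- B's table, unfolded lookups: for (i,j) in range, the stage-2 accumulation is pvCostB
  set rc : List (List (List Int)) := (PySem.List.pyRange 0 H).map (fun k =>
    (PySem.List.pyRange 0 (R - H + 1)).map (fun i =>
      (PySem.List.pyRange 0 (C - W + 1)).map (fun j =>
        ((PySem.List.pyRange 0 W).map (fun t =>
          (PySem.List.pyGetD (PySem.List.pyGetD purchased_land (i + k) []) (j + t) 0 -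
           PySem.List.pyGetD (PySem.List.pyGetD perfect_store k []) t 0) ^ 2)).sum))) with hrc
  have hsB : ∀ p : Int × Int, 0 ≤ p.1 → p.1 < R - H + 1 → 0 ≤ p.2 → p.2 < C - W + 1 →
      (PySem.List.pyRange 0 H).foldl (fun s k =>
        s + PySem.List.pyGetD (PySem.List.pyGetD (PySem.List.pyGetD rc k []) p.1 []) p.2 0) 0 =
      pvCostB purchased_land perfect_store W H p := by
    intro p hi0 hi hj0 hj
    rw [PySem.List.foldl_add]
    unfold pvCostB
    simp only [zero_add]
    congr 1
    apply List.map_congr_left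
    intro k hkmem
    rw [PySem.List.mem_pyRange_one] at hkmem
    rw [hrc]
    rw [PySem.List.pyGetD_map_pyRange_of_nonneg _ H k [] hkmem.1 hkmem.2]
    rw [PySem.List.pyGetD_map_pyRange_of_nonneg _ (R - H + 1) p.1 [] hi0 hi]
    rw [PySem.List.pyGetD_map_pyRange_of_nonneg _ (C - W + 1) p.2 0 hj0 hj]
  -- membership in prodL gives the bounds
  have hmemP : ∀ p : Int × Int, p ∈ prodL →
      0 ≤ p.1 ∧ p.1 < R - H + 1 ∧ 0 ≤ p.2 ∧ p.2 < C - W + 1 := by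
    intro p hp
    rw [hprodL, List.mem_flatMap] at hp
    obtain ⟨i, hi, hp⟩ := hp
    rw [List.mem_map] at hp
    obtain ⟨j, hj, rfl⟩ := hp
    rw [PySem.List.mem_pyRange_one] at hi hj
    exact ⟨hi.1, hi.2, hj.1, hj.2⟩
  -- A's side
  have hA : find_best_subgrid purchased_land perfect_store R C H W =
      ((prodL.foldl (pvStepA (pvCostA purchased_land perfect_store W H)) (none, 1, 1)).1.getD 0,
       (prodL.foldl (pvStepA (pvCostA purchased_land perfect_store W H)) (none, 1, 1)).2.1,
       (prodL.foldl (pvStepA (pvCostA purchased_land perfect_store W H)) (none, 1, 1)).2.2) := rfl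
  -- B's side as a pvStepM fold over scored candidates
  have hB : find_best_subgrid_alt purchased_land perfect_store R C H W =
      ((prodL.map (fun p => (pvCostB purchased_land perfect_store W H p, p.1 + 1, p.2 + 1))).foldl
        pvStepM none).getD (0, 1, 1) := by
    show (prodL.foldl (fun (b : Option (Int × Int × Int)) p =>
      let s := (PySem.List.pyRange 0 H).foldl (fun s k =>
        s + PySem.List.pyGetD (PySem.List.pyGetD (PySem.List.pyGetD rc k []) p.1 []) p.2 0) 0
      match b with
      | none => some (s, p.1 + 1, p.2 + 1)
      | some m => if s < m.1 then some (s, p.1 + 1, p.2 + 1) else some m) none).getD (0, 1, 1) = _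
    rw [List.foldl_map]
    congr 1
    apply PySem.List.foldl_congr_mem
    intro b p hp
    obtain ⟨h1, h2, h3, h4⟩ := hmemP p hp
    rw [hsB p h1 h2 h3 h4]
    cases b <;> rfl
  -- the two scored candidate lists agree
  have hmap : prodL.map (fun p => (pvCostA purchased_land perfect_store W H p, p.1 + 1, p.2 + 1)) =
      prodL.map (fun p => (pvCostB purchased_land perfect_store W H p, p.1 + 1, p.2 + 1)) := by
    apply List.map_congr_left
    intro p hp
    obtain ⟨h1, h2, h3, h4⟩ := hmemP p hp
    have := pv_cost_eq purchased_land perfect_store R C H W hpre p.1 p.2 h1 h2 h3 h4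
    rw [show ((p.1 : Int), (p.2 : Int)) = p from rfl] at this
    rw [this]
  -- prodL is nonempty inside Pre_
  have hmem : ((0 : Int), (0 : Int)) ∈ prodL := by
    rw [hprodL]
    apply List.mem_flatMap.mpr
    refine ⟨0, ?_, ?_⟩
    · rw [PySem.List.mem_pyRange_one]; omega
    · exact List.mem_map.mpr ⟨0, by rw [PySem.List.mem_pyRange_one]; omega, rfl⟩
  obtain ⟨p, t, hpt⟩ := List.exists_cons_of_ne_nil (List.ne_nil_of_mem hmem)
  obtain ⟨d, hd⟩ := pv_foldM_some
    ((t.map (fun p => (pvCostB purchased_land perfect_store W H p, p.1 + 1, p.2 + 1))))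
    (pvCostB purchased_land perfect_store W H p, p.1 + 1, p.2 + 1)
  have hfold : (prodL.map (fun p => (pvCostB purchased_land perfect_store W H p, p.1 + 1, p.2 + 1))).foldl
      pvStepM none = some d := by
    rw [hpt, List.map_cons, List.foldl_cons]
    exact hd
  rw [hA, hB, pv_foldA, hmap, hfold]
  rfl

-- ===== VERDICT (by name: the statement is the Claim_ definition above) =====
theorem find_best_subgrid_spec : Claim_equal_find_best_subgrid := by
  intro purchased_land perfect_store R C H W hdom hpre
  unfold Spec_find_best_subgrid
  exact pv_main purchased_land perfect_store R C H W hpre
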